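-- pv_equiv track=rewrite | github.com/Freakybob-Team/SGC-Plus-Plus | src/operations.py | process_escape_sequences
-- ===== SOURCE A (Python) =====
-- def process_escape_sequences(text):
--     escape_sequences = {
--         '\\n': '\n',
--         '\\t': '\t',
--         '\\r': '\r',
--         '\\"': '"',
--         "\\'": "'",
--         '\\\\': '\\',
--         '\\p1': '(',
--         '\\p2': ')',
--     }
--
--     for escape_seq, replacement in escape_sequences.items():
--         text = text.replace(escape_seq, replacement)
--
--     i = 0
--     result = ""
--     while i < len(text):
--         if text[i:i+2] == '\\0' and i+4 < len(text) and text[i+2] == '3' and text[i+3] == '3':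
--             end_idx = text.find('m', i+4)
--             if end_idx != -1:
--                 ansi_seq = '\033' + text[i+4:end_idx+1]
--                 result += ansi_seq
--                 i = end_idx + 1
--                 continue
--
--         result += text[i]
--         i += 1
--
--     return result
-- ===== SOURCE B (Python) =====
-- def process_escape_sequences(text):
--     # Same normalization pass as the original (order matters: '\\\\' after '\\n' etc.)
--     for old, new in (('\\n', '\n'), ('\\t', '\t'), ('\\r', '\r'), ('\\"', '"'),
--                      ("\\'", "'"), ('\\\\', '\\'), ('\\p1', '('), ('\\p2', ')')):
--         text = text.replace(old, new)
--     # Chunked scanner: jump with str.find instead of walking char by char.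
--     out = []
--     while True:
--         k = text.find('\\033')
--         if k == -1 or k + 4 >= len(text):
--             out.append(text)
--             break
--         m = text.find('m', k + 4)
--         if m == -1:
--             out.append(text)
--             break
--         out.append(text[:k])
--         out.append('\033' + text[k + 4:m + 1])
--         text = text[m + 1:]
--     return ''.join(out)
-- ===== Notes on version B (the rewrite author's own statement) =====
-- stated objective: faster
-- what changed: Keeps the eight sequential replace() normalizations, but replaces the per-character while-loop scanner (slice comparison and string += per character) with a chunked scanner that jumps between escape markers with str.find, appends whole slices to a list and joins once.
import Mathlib
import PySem

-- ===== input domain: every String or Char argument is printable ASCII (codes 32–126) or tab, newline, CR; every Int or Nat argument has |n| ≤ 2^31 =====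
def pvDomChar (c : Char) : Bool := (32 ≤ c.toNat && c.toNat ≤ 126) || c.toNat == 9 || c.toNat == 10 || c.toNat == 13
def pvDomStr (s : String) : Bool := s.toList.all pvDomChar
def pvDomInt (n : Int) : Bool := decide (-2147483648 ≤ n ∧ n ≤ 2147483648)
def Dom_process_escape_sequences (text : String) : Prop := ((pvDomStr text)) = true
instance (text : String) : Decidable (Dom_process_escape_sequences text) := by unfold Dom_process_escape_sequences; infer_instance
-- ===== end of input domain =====

-- B keeps A's eight replace() normalizations but swaps A's per-character while-scanner for a
-- find-based chunked scanner (jump to the next '\033' marker, slice whole chunks); same return value.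

-- ===== PORT A =====

-- termination helper for both ports: a successful find(sub, start) result is ≥ start
theorem pvFindFrom_ge (t sub : List Char) (j : Nat) (hj : j ≤ t.length)
    (h : PySem.Chars.findFrom t sub (j : Int) none ≠ -1) :
    (j : Int) ≤ PySem.Chars.findFrom t sub (j : Int) none :=
  (PySem.Chars.findFrom_natCast_spec t sub j hj h).1

-- measure lemmas cited by name in decreasing_by (keeps the compiled definitions small)
theorem pvDecA1 (t : List Char) (i : Nat) (hlen : i + 4 < t.length)
    (he : PySem.Chars.findFrom t ['m'] ((i : Int) + 4) none ≠ -1) :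
    t.length - (PySem.Chars.findFrom t ['m'] ((i : Int) + 4) none + 1).toNat < t.length - i := by
  have hcast : ((i : Int) + 4) = ((i + 4 : Nat) : Int) := by push_cast; ring
  rw [hcast] at he ⊢
  have := pvFindFrom_ge t ['m'] (i + 4) (by omega) he
  omega

theorem pvDecA2 (t : List Char) (i : Nat) (h : i < t.length) :
    t.length - (i + 1) < t.length - i := by omega

theorem pvDecB (t : List Char)
    (h1 : ¬(PySem.Chars.find t ['\\', '0', '3', '3'] = -1
      ∨ (t.length : Int) ≤ PySem.Chars.find t ['\\', '0', '3', '3'] + 4))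
    (h2 : ¬PySem.Chars.findFrom t ['m'] (PySem.Chars.find t ['\\', '0', '3', '3'] + 4) none = -1) :
    (PySem.List.slice t
      (some (PySem.Chars.findFrom t ['m'] (PySem.Chars.find t ['\\', '0', '3', '3'] + 4) none + 1)) none).length
      < t.length := by
  rcases not_or.1 h1 with ⟨h1a, h1b⟩
  have hk0 : (0 : Int) ≤ PySem.Chars.find t ['\\', '0', '3', '3'] := by
    have h1c := PySem.Chars.neg_one_le_find t ['\\', '0', '3', '3']
    omega
  set k : Int := PySem.Chars.find t ['\\', '0', '3', '3'] with hk
  have hcast : k + 4 = ((k.toNat + 4 : Nat) : Int) := by omega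
  rw [hcast] at h2 ⊢
  have hm := pvFindFrom_ge t ['m'] (k.toNat + 4) (by omega) h2
  have hs := PySem.List.slice_from t
    (a := PySem.Chars.findFrom t ['m'] ((k.toNat + 4 : Nat) : Int) none + 1) (by omega)
  rw [hs]
  simp only [List.length_drop]
  omega

-- A's while-loop: index i into the fixed text, result accumulator
def pvLoopA (t : List Char) (i : Nat) (res : List Char) : List Char :=
  if h : i < t.length then
    if hc : PySem.List.slice t (some (i : Int)) (some ((i : Int) + 2)) = ['\\', '0']
        ∧ i + 4 < t.length
        ∧ PySem.List.pyGet? t ((i : Int) + 2) = some '3'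
        ∧ PySem.List.pyGet? t ((i : Int) + 3) = some '3' then
      if he : PySem.Chars.findFrom t ['m'] ((i : Int) + 4) none ≠ -1 then
        -- ansi_seq = '\033' + text[i+4:end_idx+1]; i = end_idx + 1
        pvLoopA t (PySem.Chars.findFrom t ['m'] ((i : Int) + 4) none + 1).toNat
          (res ++ '\x1b' :: PySem.List.slice t (some ((i : Int) + 4))
            (some (PySem.Chars.findFrom t ['m'] ((i : Int) + 4) none + 1)))
      else
        pvLoopA t (i + 1) (res ++ [t[i]])
    else
      pvLoopA t (i + 1) (res ++ [t[i]])
  else res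
termination_by t.length - i
decreasing_by
  · exact pvDecA1 t i hc.2.1 he
  · exact pvDecA2 t i h
  · exact pvDecA2 t i h

def process_escape_sequences (text : String) : String :=
  let t := PySem.Str.replace text "\\n" "\n"
  let t := PySem.Str.replace t "\\t" "\t"
  let t := PySem.Str.replace t "\\r" "\r"
  let t := PySem.Str.replace t "\\\"" "\""
  let t := PySem.Str.replace t "\\'" "'"
  let t := PySem.Str.replace t "\\\\" "\\"
  let t := PySem.Str.replace t "\\p1" "("
  let t := PySem.Str.replace t "\\p2" ")"
  String.ofList (pvLoopA t.toList 0 [])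

-- ===== PORT B =====

-- Source B's while-True loop: current tail t, list accumulator acc
def pvScanB (t : List Char) (acc : List Char) : List Char :=
  if h1 : PySem.Chars.find t ['\\', '0', '3', '3'] = -1
      ∨ (t.length : Int) ≤ PySem.Chars.find t ['\\', '0', '3', '3'] + 4 then
    acc ++ t
  else
    if h2 : PySem.Chars.findFrom t ['m'] (PySem.Chars.find t ['\\', '0', '3', '3'] + 4) none = -1 then
      acc ++ t
    else
      pvScanB
        (PySem.List.slice t
          (some (PySem.Chars.findFrom t ['m'] (PySem.Chars.find t ['\\', '0', '3', '3'] + 4) none + 1)) none)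
        (acc ++ PySem.List.slice t none (some (PySem.Chars.find t ['\\', '0', '3', '3']))
          ++ '\x1b' :: PySem.List.slice t (some (PySem.Chars.find t ['\\', '0', '3', '3'] + 4))
            (some (PySem.Chars.findFrom t ['m'] (PySem.Chars.find t ['\\', '0', '3', '3'] + 4) none + 1)))
termination_by t.length
decreasing_by
  exact pvDecB t h1 h2

def process_escape_sequences_alt (text : String) : String :=
  let t := PySem.Str.replace text "\\n" "\n"
  let t := PySem.Str.replace t "\\t" "\t"
  let t := PySem.Str.replace t "\\r" "\r"
  let t := PySem.Str.replace t "\\\"" "\""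
  let t := PySem.Str.replace t "\\'" "'"
  let t := PySem.Str.replace t "\\\\" "\\"
  let t := PySem.Str.replace t "\\p1" "("
  let t := PySem.Str.replace t "\\p2" ")"
  String.ofList (pvScanB t.toList [])

-- ===== PRECONDITION & SPEC =====
def Spec_process_escape_sequences (text : String) (out : String) : Prop := out = process_escape_sequences_alt text
instance (text : String) (out : String) : Decidable (Spec_process_escape_sequences text out) := by unfold Spec_process_escape_sequences; infer_instance

-- ===== CLAIM (what is proved, stated in full; the proofs are below) =====
def Claim_equal_process_escape_sequences : Prop := ∀ (text : String), Dom_process_escape_sequences text → Spec_process_escape_sequences text (process_escape_sequences text)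

-- ===== LEMMAS AND PROOFS =====

-- "at position j, A's loop copies one character": either the ANSI-start test fails
-- or the find('m', j+4) fails
def pvCopies (t : List Char) (j : Nat) : Prop :=
  ¬(['\\', '0', '3', '3'] <+: t.drop j ∧ j + 4 < t.length)
  ∨ PySem.Chars.findFrom t ['m'] ((j : Int) + 4) none = -1

theorem pvPrefix_iff (d : List Char) :
    (d.take 2 = ['\\', '0'] ∧ d[2]? = some '3' ∧ d[3]? = some '3')
    ↔ ['\\', '0', '3', '3'] <+: d := by
  rcases d with _ | ⟨a, _ | ⟨b, _ | ⟨c, _ | ⟨e, r⟩⟩⟩⟩ <;>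
    simp [List.cons_prefix_cons] <;> tauto

-- A's ANSI-start test at position j, rephrased
theorem pvCond_iff (t : List Char) (j : Nat) :
    (PySem.List.slice t (some (j : Int)) (some ((j : Int) + 2)) = ['\\', '0']
      ∧ j + 4 < t.length
      ∧ PySem.List.pyGet? t ((j : Int) + 2) = some '3'
      ∧ PySem.List.pyGet? t ((j : Int) + 3) = some '3')
    ↔ (['\\', '0', '3', '3'] <+: t.drop j ∧ j + 4 < t.length) := by
  have h1 : ((j : Int) + 2) = ((j + 2 : Nat) : Int) := by push_cast; ring
  have h2 : ((j : Int) + 3) = ((j + 3 : Nat) : Int) := by push_cast; ring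
  rw [h1, h2, PySem.List.pyGet?_natCast, PySem.List.pyGet?_natCast]
  have h3 : PySem.List.slice t (some (j : Int)) (some ((j + 2 : Nat) : Int))
      = (t.drop j).take 2 := by
    have := PySem.List.slice_natCast t j (j + 2)
    rw [this]; congr 1; omega
  rw [h3]
  have hg2 : t[j + 2]? = (t.drop j)[2]? := by rw [List.getElem?_drop]
  have hg3 : t[j + 3]? = (t.drop j)[3]? := by rw [List.getElem?_drop]
  rw [hg2, hg3]
  constructor
  · rintro ⟨hta, hlen, hc2, hc3⟩
    exact ⟨(pvPrefix_iff _).1 ⟨hta, hc2, hc3⟩, hlen⟩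
  · rintro ⟨hp, hlen⟩
    have := (pvPrefix_iff _).2 hp
    tauto

theorem pvLoopA_end (t res : List Char) (i : Nat) (h : t.length ≤ i) :
    pvLoopA t i res = res := by
  rw [pvLoopA, dif_neg (by omega)]

theorem pvLoopA_copy (t : List Char) (j : Nat) (res : List Char) (h : j < t.length)
    (hcopy : pvCopies t j) :
    pvLoopA t j res = pvLoopA t (j + 1) (res ++ [t[j]]) := by
  rw [pvLoopA, dif_pos h]
  by_cases hc : PySem.List.slice t (some (j : Int)) (some ((j : Int) + 2)) = ['\\', '0']
      ∧ j + 4 < t.length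
      ∧ PySem.List.pyGet? t ((j : Int) + 2) = some '3'
      ∧ PySem.List.pyGet? t ((j : Int) + 3) = some '3'
  · rw [dif_pos hc]
    have hm : ¬ (PySem.Chars.findFrom t ['m'] ((j : Int) + 4) none ≠ -1) := by
      rcases hcopy with hnc | hm1
      · exact absurd ((pvCond_iff t j).1 hc) hnc
      · intro hne; exact hne hm1
    rw [dif_neg hm]
  · rw [dif_neg hc]

theorem pvLoopA_run (t : List Char) (k : Nat) : ∀ (i : Nat) (res : List Char),
    i + k ≤ t.length →
    (∀ j, i ≤ j → j < i + k → pvCopies t j) →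
    pvLoopA t i res = pvLoopA t (i + k) (res ++ (t.drop i).take k) := by
  induction k with
  | zero => intro i res _ _; simp
  | succ n ih =>
    intro i res hlen hc
    have hi : i < t.length := by omega
    rw [pvLoopA_copy t i res hi (hc i le_rfl (by omega))]
    rw [ih (i + 1) (res ++ [t[i]]) (by omega) (fun j hj1 hj2 => hc j (by omega) (by omega))]
    have harg : (res ++ [t[i]]) ++ (t.drop (i + 1)).take n = res ++ (t.drop i).take (n + 1) := by
      rw [List.drop_eq_getElem_cons hi, List.take_succ_cons, List.append_assoc]
      rfl
    rw [show i + 1 + n = i + (n + 1) by omega, harg]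

theorem pvLoopA_all (t : List Char) (i : Nat) (res : List Char)
    (hi : i ≤ t.length)
    (hc : ∀ j, i ≤ j → j < t.length → pvCopies t j) :
    pvLoopA t i res = res ++ t.drop i := by
  rw [pvLoopA_run t (t.length - i) i res (by omega) (fun j h1 h2 => hc j h1 (by omega))]
  rw [pvLoopA_end _ _ _ (by omega)]
  congr 1
  exact List.take_of_length_le (by simp)

theorem pvPrefix_drop_infix {sub d : List Char} {n : Nat} (h : sub <+: d.drop n) :
    sub <:+: d :=
  (PySem.Chars.isIn_iff_infix _ _).1 ((PySem.Chars.exists_prefix_drop_iff_isIn _ _).1 ⟨n, h⟩)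

theorem pvInfix_drop {sub d : List Char} {n : Nat} (h : sub <:+: d.drop n) :
    sub <:+: d :=
  h.trans (List.drop_suffix n d).isInfix

theorem pvScanB_nil (acc : List Char) : pvScanB [] acc = acc := by
  rw [pvScanB, dif_pos (Or.inl (by decide))]
  simp

theorem pvMain (fuel : Nat) : ∀ (t : List Char) (i : Nat) (res : List Char),
    t.length - i ≤ fuel → pvLoopA t i res = pvScanB (t.drop i) res := by
  induction fuel with
  | zero =>
    intro t i res hf
    have hi : t.length ≤ i := by omega
    rw [pvLoopA_end t res i hi, List.drop_eq_nil_of_le hi, pvScanB_nil]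
  | succ n ih =>
    intro t i res hf
    by_cases hi : t.length ≤ i
    · rw [pvLoopA_end t res i hi, List.drop_eq_nil_of_le hi, pvScanB_nil]
    replace hi : i < t.length := Nat.lt_of_not_le hi
    have hdlen : (t.drop i).length = t.length - i := by simp
    set d := t.drop i with hd
    have hdj : ∀ j : Nat, i ≤ j → t.drop j = d.drop (j - i) := by
      intro j hj
      rw [hd, List.drop_drop]
      congr 1; omega
    by_cases h1 : PySem.Chars.find d ['\\', '0', '3', '3'] = -1
        ∨ (d.length : Int) ≤ PySem.Chars.find d ['\\', '0', '3', '3'] + 4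
    · -- no usable marker in the rest: A copies every remaining character, B appends the tail
      have hall : ∀ j, i ≤ j → j < t.length → pvCopies t j := by
        intro j hij hjlen
        left
        rintro ⟨hp, hjl⟩
        rw [hdj j hij] at hp
        rcases h1 with h1a | h1b
        · exact ((PySem.Chars.find_eq_neg_one_iff d _).1 h1a) (pvPrefix_drop_infix hp)
        · have hk0 : (0 : Int) ≤ PySem.Chars.find d ['\\', '0', '3', '3'] := by
            have := PySem.Chars.neg_one_le_find d ['\\', '0', '3', '3']
            rcases eq_or_lt_of_le this with he | hl
            · exfalso
              have h4 : (4 : Int) ≤ (d.length : Int) := by omega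
              have hlen4 : 4 ≤ d.length := by exact_mod_cast h4
              have := hp.length_le
              simp at this
              omega
            · omega
          have hspec := PySem.Chars.find_spec (s := d) (sub := ['\\', '0', '3', '3']) hk0
          have hmin := hspec.2 (j - i)
          have hge : (PySem.Chars.find d ['\\', '0', '3', '3']).toNat ≤ j - i := by
            by_contra hlt
            exact hmin (by omega) hp
          have hplen := hp.length_le
          simp at hplen
          have : j - i + 4 ≤ d.length := by omega
          omega
      rw [pvLoopA_all t i res (by omega) hall, pvScanB, dif_pos h1]
    · rcases not_or.1 h1 with ⟨h1a, h1b⟩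
      have hk0 : (0 : Int) ≤ PySem.Chars.find d ['\\', '0', '3', '3'] := by
        have := PySem.Chars.neg_one_le_find d ['\\', '0', '3', '3']
        omega
      set k : Int := PySem.Chars.find d ['\\', '0', '3', '3'] with hk
      set k' : Nat := k.toNat with hk'
      have hkk : k = (k' : Int) := by omega
      have hklen : k' + 4 < d.length := by
        have : k + 4 < (d.length : Int) := by omega
        omega
      have hspec := PySem.Chars.find_spec (s := d) (sub := ['\\', '0', '3', '3']) hk0
      have hpref : ['\\', '0', '3', '3'] <+: d.drop k' := hspec.1
      have hmin := hspec.2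
      have hc4 : k + 4 = ((k' + 4 : Nat) : Int) := by omega
      by_cases h2 : PySem.Chars.findFrom d ['m'] (k + 4) none = -1
      · -- marker found but no 'm' after it anywhere: A copies everything, B appends the tail
        have h2' : PySem.Chars.findFrom d ['m'] ((k' + 4 : Nat) : Int) none = -1 := by
          rw [← hc4]; exact h2
        have hnoM : ¬ ['m'] <:+: d.drop (k' + 4) :=
          (PySem.Chars.findFrom_natCast_eq_neg_one_iff d ['m'] (k' + 4) (by omega)).1 h2'
        have hall : ∀ j, i ≤ j → j < t.length → pvCopies t j := by
          intro j hij hjlen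
          by_cases hp : ['\\', '0', '3', '3'] <+: t.drop j ∧ j + 4 < t.length
          · right
            have hcastj : ((j : Int) + 4) = ((j + 4 : Nat) : Int) := by push_cast; ring
            rw [hcastj]
            rw [PySem.Chars.findFrom_natCast_eq_neg_one_iff t ['m'] (j + 4) (by omega)]
            intro hinf
            have hge : k' ≤ j - i := by
              by_contra hlt
              exact hmin (j - i) (by omega) (by rw [← hdj j hij]; exact hp.1)
            have hdrop : t.drop (j + 4) = (d.drop (k' + 4)).drop (j - i - k') := by
              rw [List.drop_drop, hdj (j + 4) (by omega)]
              congr 1; omega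
            rw [hdrop] at hinf
            exact hnoM (pvInfix_drop hinf)
          · left; exact hp
        rw [pvLoopA_all t i res (by omega) hall, pvScanB, dif_neg h1, dif_pos h2]
      · -- full ANSI chunk: A copies up to the marker, consumes it, and recurses; so does B
        have h2' : PySem.Chars.findFrom d ['m'] ((k' + 4 : Nat) : Int) none ≠ -1 := by
          rw [← hc4]; exact h2
        have hmspec := PySem.Chars.findFrom_natCast_spec d ['m'] (k' + 4) (by omega) h2'
        set m : Int := PySem.Chars.findFrom d ['m'] ((k' + 4 : Nat) : Int) none with hmdef
        have hm4 : ((k' + 4 : Nat) : Int) ≤ m := hmspec.1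
        set m' : Nat := m.toNat with hm'
        have hmm : m = (m' : Int) := by omega
        -- step 1: copy the k' characters before the marker
        have hrun : pvLoopA t i res = pvLoopA t (i + k') (res ++ d.take k') := by
          have := pvLoopA_run t k' i res (by omega) (fun j hj1 hj2 => by
            left
            rintro ⟨hp, _⟩
            exact hmin (j - i) (by omega) (by rw [← hdj j hj1]; exact hp))
          rw [this, hd]
        rw [hrun, pvLoopA, dif_pos (show i + k' < t.length by omega)]
        have hcond : PySem.List.slice t (some ((i + k' : Nat) : Int)) (some (((i + k' : Nat) : Int) + 2)) = ['\\', '0']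
            ∧ (i + k') + 4 < t.length
            ∧ PySem.List.pyGet? t (((i + k' : Nat) : Int) + 2) = some '3'
            ∧ PySem.List.pyGet? t (((i + k' : Nat) : Int) + 3) = some '3' := by
          apply (pvCond_iff t (i + k')).2
          refine ⟨?_, by omega⟩
          rw [hdj (i + k') (by omega)]
          simpa using hpref
        rw [dif_pos hcond]
        have hcast2 : (((i + k' : Nat) : Int) + 4) = ((i + k' + 4 : Nat) : Int) := by push_cast; ring
        rw [hcast2]
        have hdd : t.drop (i + k' + 4) = d.drop (k' + 4) := by
          rw [hdj (i + k' + 4) (by omega)]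
          congr 1; omega
        have hE : PySem.Chars.findFrom t ['m'] ((i + k' + 4 : Nat) : Int) none = (i : Int) + m := by
          rw [PySem.Chars.findFrom_natCast t ['m'] (i + k' + 4) (by omega), hdd]
          rw [hmdef, PySem.Chars.findFrom_natCast d ['m'] (k' + 4) (by omega)]
          by_cases hf1 : PySem.Chars.find (d.drop (k' + 4)) ['m'] = -1
          · exfalso
            apply h2'
            rw [hmdef] at h2' ⊢
            rw [PySem.Chars.findFrom_natCast d ['m'] (k' + 4) (by omega), if_pos hf1]
          · rw [if_neg hf1, if_neg hf1]
            push_cast; ring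
        rw [hE]
        rw [dif_pos (show ((i : Int) + m) ≠ -1 by omega)]
        -- compute both slices and the new index, then recurse on both sides
        have hidx : ((i : Int) + m + 1).toNat = i + m' + 1 := by omega
        have hsliceA : PySem.List.slice t (some ((i + k' + 4 : Nat) : Int)) (some ((i : Int) + m + 1))
            = (d.drop (k' + 4)).take (m' + 1 - (k' + 4)) := by
          have hcm : (i : Int) + m + 1 = ((i + m' + 1 : Nat) : Int) := by omega
          rw [hcm, PySem.List.slice_natCast, hdd]
          congr 1; omega
        rw [hidx, hsliceA]
        -- right-hand side: unfold B once
        rw [pvScanB, dif_neg h1, dif_neg h2]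
        have hsB1 : PySem.List.slice d none (some k) = d.take k' := by
          rw [PySem.List.slice_to d hk0]
        have hsB2 : PySem.List.slice d (some ((k' + 4 : Nat) : Int)) (some (m + 1))
            = (d.drop (k' + 4)).take (m' + 1 - (k' + 4)) := by
          have hcm1 : m + 1 = ((m' + 1 : Nat) : Int) := by omega
          rw [hcm1, PySem.List.slice_natCast]
        have hsB3 : PySem.List.slice d (some (m + 1)) none = d.drop (m' + 1) := by
          rw [PySem.List.slice_from d (a := m + 1) (by omega)]
          congr 1; omega
        have hdd2 : t.drop (i + m' + 1) = d.drop (m' + 1) := by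
          rw [hdj (i + m' + 1) (by omega)]
          congr 1; omega
        -- A recurses at index i+m'+1; by the IH that is B's loop on the corresponding tail
        rw [ih t (i + m' + 1) _ (by omega), hdd2]
        rw [hc4, ← hmdef, hsB1, hsB2, hsB3]
  -- end of pvMain

-- ===== VERDICT (by name: the statement is the Claim_ definition above) =====
theorem process_escape_sequences_spec : Claim_equal_process_escape_sequences := by
  intro text _
  unfold Spec_process_escape_sequences process_escape_sequences process_escape_sequences_alt
  dsimp only
  refine congrArg String.ofList ?_
  simpa using pvMain _ _ 0 [] (le_refl _)
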